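-- pv_equiv track=rewrite | github.com/jebent521/CSC310-Programming-Languages | Python/LittleQuilt.py | quilt_to_string
-- ===== SOURCE A (Python) =====
-- def quilt_to_string(quilt, string1, string2):
--     '''returns a stringified quilt using string1 for 'a' atoms and string2 for 'b' atoms'''
--     result = ''
--     for row in quilt:
--         for atom in row:                        # iterate through each atom in the row, printing the first 2 characters
--             if atom[0] == 'a':
--                 result += (string1[atom[1]])[:2]
--             else:
--                 result += (string2[atom[1]])[:2]
--         result += '\n'
--         for atom in row:                        # iterate through each atom in the row, printing the last 2 characters
--             if atom[0] == 'a':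
--                 result += (string1[atom[1]])[2:4]
--             else:
--                 result += (string2[atom[1]])[2:4]
--         result += '\n'
--     return result
-- ===== SOURCE B (Python) =====
-- def quilt_to_string(quilt, string1, string2):
--     '''returns a stringified quilt using string1 for 'a' atoms and string2 for 'b' atoms'''
--     def atom_str(atom):
--         return string1[atom[1]] if atom[0] == 'a' else string2[atom[1]]
--     result = ''
--     for row in quilt:
--         top = ''
--         bottom = ''
--         for atom in row:
--             s = atom_str(atom)
--             top += s[:2]
--             bottom += s[2:4]
--         result += top + '\n' + bottom + '\n'
--     return result
-- ===== Notes on version B (the rewrite author's own statement) =====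
-- stated objective: simpler
-- what changed: Each row is rendered in a single pass over its atoms maintaining separate top/bottom accumulators (with the atom-to-string dispatch factored into a helper), instead of A's two independent loops over every row.
import Mathlib
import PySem

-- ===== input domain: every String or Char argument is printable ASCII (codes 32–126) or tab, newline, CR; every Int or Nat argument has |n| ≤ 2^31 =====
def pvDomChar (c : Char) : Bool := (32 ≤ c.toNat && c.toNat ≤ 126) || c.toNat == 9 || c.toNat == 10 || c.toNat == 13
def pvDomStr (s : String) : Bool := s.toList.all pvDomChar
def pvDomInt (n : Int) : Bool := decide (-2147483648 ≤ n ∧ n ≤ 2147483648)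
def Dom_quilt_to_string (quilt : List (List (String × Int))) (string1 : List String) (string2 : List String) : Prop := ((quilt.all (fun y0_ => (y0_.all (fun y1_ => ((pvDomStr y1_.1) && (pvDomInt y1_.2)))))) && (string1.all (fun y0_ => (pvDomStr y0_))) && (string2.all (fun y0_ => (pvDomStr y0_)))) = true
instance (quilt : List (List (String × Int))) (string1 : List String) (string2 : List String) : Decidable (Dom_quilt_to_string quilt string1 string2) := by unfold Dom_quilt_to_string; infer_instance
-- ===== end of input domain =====

-- B renders each row in ONE pass keeping top/bottom accumulators (with the atom lookup
-- factored into a helper) instead of A's two separate loops per row; objective: simpler.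


-- ===== PORT A =====
-- literal port of A: two inner loops per row, one string accumulator (kept as List Char;
-- PySem.List.pyGetD is Python's list indexing, total under Pre_'s InRange condition)
def quilt_to_string (quilt : List (List (String × Int))) (string1 : List String) (string2 : List String) : String :=
  String.ofList (quilt.foldl (fun result row =>
    let result := row.foldl (fun result atom =>
      if atom.1 = "a" then
        result ++ PySem.List.slice (PySem.List.pyGetD string1 atom.2 "").toList none (some 2)
      else
        result ++ PySem.List.slice (PySem.List.pyGetD string2 atom.2 "").toList none (some 2)) result
    let result := result ++ ['\n']
    let result := row.foldl (fun result atom =>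
      if atom.1 = "a" then
        result ++ PySem.List.slice (PySem.List.pyGetD string1 atom.2 "").toList (some 2) (some 4)
      else
        result ++ PySem.List.slice (PySem.List.pyGetD string2 atom.2 "").toList (some 2) (some 4)) result
    result ++ ['\n']) [])

-- ===== PORT B =====
-- B-side helper: the atom → string dispatch
def pvAtomChars (string1 string2 : List String) (atom : String × Int) : List Char :=
  if atom.1 = "a" then (PySem.List.pyGetD string1 atom.2 "").toList
  else (PySem.List.pyGetD string2 atom.2 "").toList

def quilt_to_string_alt (quilt : List (List (String × Int))) (string1 : List String) (string2 : List String) : String :=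
  String.ofList (quilt.foldl (fun result row =>
    let tb := row.foldl (fun (tb : List Char × List Char) atom =>
      let s := pvAtomChars string1 string2 atom
      (tb.1 ++ PySem.List.slice s none (some 2), tb.2 ++ PySem.List.slice s (some 2) (some 4)))
      ([], [])
    result ++ tb.1 ++ ['\n'] ++ tb.2 ++ ['\n']) [])

-- ===== PRECONDITION & SPEC =====
-- Pre_ excludes exactly the inputs where Python A raises IndexError: an atom whose index
-- is out of range (Python's negative-wrap rule) for the list its tag selects.
def Pre_quilt_to_string (quilt : List (List (String × Int))) (string1 : List String) (string2 : List String) : Prop :=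
  ∀ row ∈ quilt, ∀ atom ∈ row,
    if atom.1 = "a" then PySem.Raise.InRange string1.length atom.2
    else PySem.Raise.InRange string2.length atom.2
instance (quilt : List (List (String × Int))) (string1 : List String) (string2 : List String) : Decidable (Pre_quilt_to_string quilt string1 string2) := by unfold Pre_quilt_to_string; infer_instance
def pvWitness_quilt_to_string : (List (List (String × Int))) × List String × List String :=
  ([[("a", 0), ("b", 1)], [("b", 0), ("a", 1)]], ["AB12", "CD34"], ["WX56", "YZ78"])
def Spec_quilt_to_string (quilt : List (List (String × Int))) (string1 : List String) (string2 : List String) (out : String) : Prop := out = quilt_to_string_alt quilt string1 string2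
instance (quilt : List (List (String × Int))) (string1 : List String) (string2 : List String) (out : String) : Decidable (Spec_quilt_to_string quilt string1 string2 out) := by unfold Spec_quilt_to_string; infer_instance

-- ===== CLAIM (what is proved, stated in full; the proofs are below) =====
def Claim_equal_quilt_to_string : Prop := ∀ (quilt : List (List (String × Int))) (string1 : List String) (string2 : List String), Dom_quilt_to_string quilt string1 string2 → Pre_quilt_to_string quilt string1 string2 → Spec_quilt_to_string quilt string1 string2 (quilt_to_string quilt string1 string2)

-- ===== LEMMAS AND PROOFS =====

-- the per-atom top / bottom fragments
def pvTop (string1 string2 : List String) (atom : String × Int) : List Char :=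
  PySem.List.slice (pvAtomChars string1 string2 atom) none (some 2)
def pvBot (string1 string2 : List String) (atom : String × Int) : List Char :=
  PySem.List.slice (pvAtomChars string1 string2 atom) (some 2) (some 4)

-- A's inner loops: appending fold from any initial accumulator
theorem pvA_fold_top (string1 string2 : List String) (row : List (String × Int)) (init : List Char) :
    row.foldl (fun result atom =>
      if atom.1 = "a" then
        result ++ PySem.List.slice (PySem.List.pyGetD string1 atom.2 "").toList none (some 2)
      else
        result ++ PySem.List.slice (PySem.List.pyGetD string2 atom.2 "").toList none (some 2)) init
      = init ++ row.flatMap (pvTop string1 string2) := by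
  induction row generalizing init with
  | nil => simp
  | cons a t ih =>
      simp only [List.foldl_cons, List.flatMap_cons, ih]
      by_cases h : a.1 = "a" <;> simp [h, pvTop, pvAtomChars]

theorem pvA_fold_bot (string1 string2 : List String) (row : List (String × Int)) (init : List Char) :
    row.foldl (fun result atom =>
      if atom.1 = "a" then
        result ++ PySem.List.slice (PySem.List.pyGetD string1 atom.2 "").toList (some 2) (some 4)
      else
        result ++ PySem.List.slice (PySem.List.pyGetD string2 atom.2 "").toList (some 2) (some 4)) init
      = init ++ row.flatMap (pvBot string1 string2) := by
  induction row generalizing init with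
  | nil => simp
  | cons a t ih =>
      simp only [List.foldl_cons, List.flatMap_cons, ih]
      by_cases h : a.1 = "a" <;> simp [h, pvBot, pvAtomChars]

-- B's single pass: the pair fold splits into the two flatMaps
theorem pvB_fold (string1 string2 : List String) (row : List (String × Int)) (t b : List Char) :
    row.foldl (fun (tb : List Char × List Char) atom =>
      let s := pvAtomChars string1 string2 atom
      (tb.1 ++ PySem.List.slice s none (some 2), tb.2 ++ PySem.List.slice s (some 2) (some 4))) (t, b)
      = (t ++ row.flatMap (pvTop string1 string2), b ++ row.flatMap (pvBot string1 string2)) := by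
  induction row generalizing t b with
  | nil => simp
  | cons a r ih => simp [ih, pvTop, pvBot]

theorem pv_outer (quilt : List (List (String × Int))) (string1 string2 : List String) (init : List Char) :
    quilt.foldl (fun result row =>
      let result := row.foldl (fun result atom =>
        if atom.1 = "a" then
          result ++ PySem.List.slice (PySem.List.pyGetD string1 atom.2 "").toList none (some 2)
        else
          result ++ PySem.List.slice (PySem.List.pyGetD string2 atom.2 "").toList none (some 2)) result
      let result := result ++ ['\n']
      let result := row.foldl (fun result atom =>
        if atom.1 = "a" then
          result ++ PySem.List.slice (PySem.List.pyGetD string1 atom.2 "").toList (some 2) (some 4)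
        else
          result ++ PySem.List.slice (PySem.List.pyGetD string2 atom.2 "").toList (some 2) (some 4)) result
      result ++ ['\n']) init
    = quilt.foldl (fun result row =>
      let tb := row.foldl (fun (tb : List Char × List Char) atom =>
        let s := pvAtomChars string1 string2 atom
        (tb.1 ++ PySem.List.slice s none (some 2), tb.2 ++ PySem.List.slice s (some 2) (some 4)))
        ([], [])
      result ++ tb.1 ++ ['\n'] ++ tb.2 ++ ['\n']) init := by
  simp only [pvA_fold_top, pvA_fold_bot, pvB_fold]
  simp

-- ===== VERDICT (by name: the statement is the Claim_ definition above) =====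
theorem quilt_to_string_spec : Claim_equal_quilt_to_string := by
  intro quilt string1 string2 _ _
  unfold Spec_quilt_to_string quilt_to_string quilt_to_string_alt
  rw [pv_outer]
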